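-- pv_equiv track=rewrite | github.com/tahiri-lab/ClonalTreeClustering | WMFD/Experiments/Dashboard/step1d_evaluate.py | contingency
-- ===== SOURCE A (Python) =====
-- from typing import Dict, List, Tuple, Optional
--
-- def contingency(ids: List[str], y_true: List[int], y_pred: List[int]):
--     C_true = sorted(set(y_true))
--     C_pred = sorted(set(y_pred))
--     idx_true = {c: i for i, c in enumerate(C_true)}
--     idx_pred = {c: i for i, c in enumerate(C_pred)}
--     M = [[0] * len(C_true) for _ in range(len(C_pred))]
--     for t, p in zip(y_true, y_pred):
--         M[idx_pred[p]][idx_true[t]] += 1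
--     return C_pred, C_true, M
-- ===== SOURCE B (Python) =====
-- def contingency(ids, y_true, y_pred):
--     C_true = sorted(set(y_true))
--     C_pred = sorted(set(y_pred))
--     M = []
--     for p in C_pred:
--         trues_for_p = [t for q, t in zip(y_pred, y_true) if q == p]
--         M.append([trues_for_p.count(t) for t in C_true])
--     return C_pred, C_true, M
-- ===== Notes on version B (the rewrite author's own statement) =====
-- stated objective: alternative
-- what changed: Replaces A's single streaming pass that increments a preallocated matrix through two index dicts by a row-by-row build: for each pred label it filters that label's true-labels out of the zipped pairs and counts each column value in that sublist, so there are no index maps, no preallocated matrix and no in-place increments.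
import Mathlib
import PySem

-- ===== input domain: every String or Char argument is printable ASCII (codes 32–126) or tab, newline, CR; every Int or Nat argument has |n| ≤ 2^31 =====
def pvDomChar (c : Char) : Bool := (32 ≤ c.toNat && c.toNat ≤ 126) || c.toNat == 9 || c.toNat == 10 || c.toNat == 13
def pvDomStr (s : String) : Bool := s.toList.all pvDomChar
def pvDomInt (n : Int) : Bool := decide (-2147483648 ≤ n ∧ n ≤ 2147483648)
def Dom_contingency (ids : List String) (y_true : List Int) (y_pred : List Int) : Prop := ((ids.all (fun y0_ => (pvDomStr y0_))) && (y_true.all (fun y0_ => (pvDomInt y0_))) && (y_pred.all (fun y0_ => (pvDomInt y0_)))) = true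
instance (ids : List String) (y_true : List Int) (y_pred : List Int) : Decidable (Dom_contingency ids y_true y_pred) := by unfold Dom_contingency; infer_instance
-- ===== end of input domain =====

-- B replaces A's index-dict + in-place streaming matrix-increment pass by a row-by-row build:
-- for each pred label filter its true-labels out of the zip, then count per column; alternative decomposition, no speed claim.

-- ===== PORT A =====
-- {c: i for i, c in enumerate(C)}
def pvIdxDict (C : List Int) : PySem.Dict Int Int :=
  (PySem.List.enumerate C).foldl (fun d ic => d.insert ic.2 ic.1) ⟨[]⟩

-- literal port of A; the `none` branch of the match is Python's KeyError, unreachable because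
-- every element of the zip is a member of the list its index dict was built from
def contingency (ids : List String) (y_true : List Int) (y_pred : List Int) :
    List Int × List Int × List (List Int) :=
  let C_true := PySem.List.sorted (PySem.Set.ofList y_true) id
  let C_pred := PySem.List.sorted (PySem.Set.ofList y_pred) id
  let idx_true := pvIdxDict C_true
  let idx_pred := pvIdxDict C_pred
  let M0 := (List.range C_pred.length).map (fun _ => List.replicate C_true.length (0 : Int))
  let M := (y_true.zip y_pred).foldl (fun M tp =>
    match idx_pred.get? tp.2, idx_true.get? tp.1 with
    | some i, some j => M.modify i.toNat (fun row => row.modify j.toNat (· + 1))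
    | _, _ => M) M0
  (C_pred, C_true, M)

-- ===== PORT B =====
def contingency_alt (ids : List String) (y_true : List Int) (y_pred : List Int) :
    List Int × List Int × List (List Int) :=
  let C_true := PySem.List.sorted (PySem.Set.ofList y_true) id
  let C_pred := PySem.List.sorted (PySem.Set.ofList y_pred) id
  let M := C_pred.foldl (fun M p =>
    let trues_for_p := ((y_pred.zip y_true).filter (fun qt => qt.1 == p)).map (fun qt => qt.2)
    M ++ [C_true.map (fun t => (PySem.List.count trues_for_p t : Int))]) ([] : List (List Int))
  (C_pred, C_true, M)

-- ===== PRECONDITION & SPEC =====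
def Spec_contingency (ids : List String) (y_true : List Int) (y_pred : List Int) (out : List Int × List Int × List (List Int)) : Prop := out = contingency_alt ids y_true y_pred
instance (ids : List String) (y_true : List Int) (y_pred : List Int) (out : List Int × List Int × List (List Int)) : Decidable (Spec_contingency ids y_true y_pred out) := by unfold Spec_contingency; infer_instance

-- ===== CLAIM (what is proved, stated in full; the proofs are below) =====
def Claim_equal_contingency : Prop := ∀ (ids : List String) (y_true : List Int) (y_pred : List Int), Dom_contingency ids y_true y_pred → Spec_contingency ids y_true y_pred (contingency ids y_true y_pred)

-- ===== LEMMAS AND PROOFS =====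

-- entry of a matrix, total form
def pvE (M : List (List Int)) (i j : Nat) : Int := (M.getD i []).getD j 0

theorem pvE_eq (M : List (List Int)) (i j : Nat) :
    pvE M i j = ((M[i]?.getD [])[j]?).getD 0 := by
  simp [pvE, List.getD_eq_getElem?_getD]

theorem pvIdxDict_get_aux (C : List Int) (hC : C.Nodup) :
    ∀ (n : Int) (d : PySem.Dict Int Int) (c : Int),
      ((PySem.List.enumerate C n).foldl (fun d ic => d.insert ic.2 ic.1) d).get? c
        = if c ∈ C then some (n + (C.idxOf c : Int)) else d.get? c := by
  induction C with
  | nil => intro n d c; simp [PySem.List.enumerate]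
  | cons x xs ih =>
    intro n d c
    have hx : x ∉ xs := (List.nodup_cons.mp hC).1
    have hxs : xs.Nodup := (List.nodup_cons.mp hC).2
    have henum : PySem.List.enumerate (x :: xs) n = (n, x) :: PySem.List.enumerate xs (n + 1) := by
      simp [PySem.List.enumerate]
    rw [henum, List.foldl_cons, ih hxs]
    by_cases hcx : c = x
    · subst hcx
      have : c ∉ xs := hx
      simp [this, PySem.Dict.get?_insert_self d c n]
    · rw [PySem.Dict.get?_insert_of_ne d n hcx]
      by_cases hmem : c ∈ xs
      · simp [hmem, List.idxOf_cons, Ne.symm hcx]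
        ring
      · simp [hmem, hcx]

theorem pvIdxDict_get (C : List Int) (hC : C.Nodup) (c : Int) (hc : c ∈ C) :
    (pvIdxDict C).get? c = some (C.idxOf c : Int) := by
  unfold pvIdxDict
  rw [pvIdxDict_get_aux C hC 0 ⟨[]⟩ c]
  simp [hc]

-- the rewritten A-step, with indices resolved
def pvStep (T P : List Int) (M : List (List Int)) (tp : Int × Int) : List (List Int) :=
  M.modify (P.idxOf tp.2) (fun row => row.modify (T.idxOf tp.1) (· + 1))

theorem pvStep_len (T P : List Int) (M : List (List Int)) (tp : Int × Int) :
    (pvStep T P M tp).length = M.length := by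
  simp [pvStep]

theorem pvStep_rowlen (T P : List Int) (M : List (List Int)) (tp : Int × Int) (k : Nat) :
    ((pvStep T P M tp).getD k []).length = (M.getD k []).length := by
  unfold pvStep
  rw [List.getD_eq_getElem?_getD, List.getD_eq_getElem?_getD, List.getElem?_modify]
  cases h : M[k]? with
  | none => simp
  | some row => simp; split <;> simp

theorem pvStep_entry (T P : List Int) (M : List (List Int)) (tp : Int × Int) (i j : Nat)
    (hlen : M.length = P.length)
    (hrow : ∀ k, k < M.length → (M.getD k []).length = T.length)
    (hp : tp.2 ∈ P) (ht : tp.1 ∈ T) :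
    pvE (pvStep T P M tp) i j
      = pvE M i j + (if P.idxOf tp.2 = i ∧ T.idxOf tp.1 = j then 1 else 0) := by
  have hip : P.idxOf tp.2 < M.length := by rw [hlen]; exact List.idxOf_lt_length_iff.mpr hp
  have hjt : T.idxOf tp.1 < T.length := List.idxOf_lt_length_iff.mpr ht
  rw [pvE_eq, pvE_eq]
  unfold pvStep
  rw [List.getElem?_modify]
  by_cases hpi : P.idxOf tp.2 = i
  · have hi : i < M.length := hpi ▸ hip
    rw [List.getElem?_eq_getElem hi]
    simp only [if_pos hpi]
    simp only [Option.map_eq_map, Option.map_some, Option.getD_some]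
    have hrl : (M[i]).length = T.length := by
      have := hrow i hi; rwa [List.getD_eq_getElem _ _ hi] at this
    rw [List.getElem?_modify]
    by_cases hjj : T.idxOf tp.1 = j
    · have hj : j < (M[i]).length := by rw [hrl]; exact hjj ▸ hjt
      rw [List.getElem?_eq_getElem hj]
      simp [hjj, hpi]
    · cases h : (M[i])[j]? <;> simp [hjj, hpi, h]
  · have hcond : ¬ (P.idxOf tp.2 = i ∧ T.idxOf tp.1 = j) := fun h => hpi h.1
    rw [if_neg hcond]
    cases h : M[i]? <;> simp [hpi, h]

theorem pvFold_len (T P : List Int) :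
    ∀ (pairs : List (Int × Int)) (M : List (List Int)),
      (pairs.foldl (pvStep T P) M).length = M.length := by
  intro pairs
  induction pairs with
  | nil => intro M; rfl
  | cons x xs ih => intro M; rw [List.foldl_cons, ih, pvStep_len]

theorem pvFold_rowlen (T P : List Int) :
    ∀ (pairs : List (Int × Int)) (M : List (List Int)) (k : Nat),
      ((pairs.foldl (pvStep T P) M).getD k []).length = (M.getD k []).length := by
  intro pairs
  induction pairs with
  | nil => intro M k; rfl
  | cons x xs ih => intro M k; rw [List.foldl_cons, ih, pvStep_rowlen]

theorem pvFold_entry (T P : List Int) (i j : Nat) :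
    ∀ (pairs : List (Int × Int)) (M : List (List Int)),
      (∀ x ∈ pairs, x.1 ∈ T ∧ x.2 ∈ P) →
      M.length = P.length →
      (∀ k, k < M.length → (M.getD k []).length = T.length) →
      pvE (pairs.foldl (pvStep T P) M) i j
        = pvE M i j + (pairs.countP (fun tp => P.idxOf tp.2 == i && T.idxOf tp.1 == j) : Int) := by
  intro pairs
  induction pairs with
  | nil => intro M _ _ _; simp
  | cons x xs ih =>
    intro M hmem hlen hrow
    rw [List.foldl_cons]
    rw [ih (pvStep T P M x) (fun y hy => hmem y (List.mem_cons_of_mem _ hy))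
      (by rw [pvStep_len]; exact hlen)
      (by intro k hk; rw [pvStep_rowlen]; exact hrow k (by rwa [pvStep_len] at hk))]
    rw [pvStep_entry T P M x i j hlen hrow (hmem x List.mem_cons_self).2 (hmem x List.mem_cons_self).1]
    rw [List.countP_cons]
    by_cases h : P.idxOf x.2 = i ∧ T.idxOf x.1 = j
    · simp only [h.1, h.2, beq_self_eq_true, Bool.and_self, if_pos]
      simp
      ring
    · have hb : (P.idxOf x.2 == i && T.idxOf x.1 == j) = false := by
        rcases Decidable.not_and_iff_not_or_not.mp h with h1 | h1 <;> simp [h1]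
      simp [h, hb]

theorem pvCount_eq (T P yt yp : List Int) (i j : Nat)
    (hTnd : T.Nodup) (hPnd : P.Nodup)
    (hTm : ∀ c, c ∈ T ↔ c ∈ yt) (hPm : ∀ c, c ∈ P ↔ c ∈ yp)
    (hi : i < P.length) (hj : j < T.length) :
    (yt.zip yp).countP (fun tp => P.idxOf tp.2 == i && T.idxOf tp.1 == j)
      = (yp.zip yt).count (P[i], T[j]) := by
  rw [← List.zip_swap yt yp,
    show ((P[i], T[j]) : Int × Int) = Prod.swap (T[j], P[i]) from rfl,
    List.count_map_of_injective (yt.zip yp) Prod.swap Prod.swap_injective (T[j], P[i]),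
    List.count_eq_countP]
  refine List.countP_congr ?_
  intro tp htp
  have ht : tp.1 ∈ T := (hTm tp.1).mpr (List.of_mem_zip htp).1
  have hp : tp.2 ∈ P := (hPm tp.2).mpr (List.of_mem_zip htp).2
  simp only [Bool.and_eq_true, beq_iff_eq]
  constructor
  · rintro ⟨h1, h2⟩
    have e1 : P[i] = tp.2 := by subst h1; exact List.getElem_idxOf (List.idxOf_lt_length_iff.mpr hp)
    have e2 : T[j] = tp.1 := by subst h2; exact List.getElem_idxOf (List.idxOf_lt_length_iff.mpr ht)
    exact Prod.ext e2.symm e1.symm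
  · intro h
    rw [h]
    exact ⟨by simpa using hPnd.idxOf_getElem i hi, by simpa using hTnd.idxOf_getElem j hj⟩

-- B's column count over the filtered row equals the pair count in the full zip
theorem pvRowCount (l : List (Int × Int)) (p t : Int) :
    ((l.filter (fun qt => qt.1 == p)).map (fun qt => qt.2)).count t = l.count (p, t) := by
  rw [List.count_eq_countP, List.countP_map, List.countP_filter, List.count_eq_countP]
  refine List.countP_congr ?_
  intro x _
  simp [Function.comp, Prod.ext_iff, and_comm]

-- ===== VERDICT (by name: the statement is the Claim_ definition above) =====
theorem contingency_spec : Claim_equal_contingency := by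
  intro ids yt yp _
  unfold Spec_contingency contingency contingency_alt
  set T := PySem.List.sorted (PySem.Set.ofList yt) id with hT
  set P := PySem.List.sorted (PySem.Set.ofList yp) id with hP
  have hTperm := PySem.List.sorted_perm (PySem.Set.ofList yt) id false
  have hPperm := PySem.List.sorted_perm (PySem.Set.ofList yp) id false
  have hTnd : T.Nodup := hTperm.symm.nodup (PySem.Set.nodup_ofList yt)
  have hPnd : P.Nodup := hPperm.symm.nodup (PySem.Set.nodup_ofList yp)
  have hTm : ∀ c, c ∈ T ↔ c ∈ yt := fun c => hTperm.mem_iff.trans (PySem.Set.mem_ofList yt c)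
  have hPm : ∀ c, c ∈ P ↔ c ∈ yp := fun c => hPperm.mem_iff.trans (PySem.Set.mem_ofList yp c)
  refine Prod.ext rfl (Prod.ext rfl ?_)
  -- replace A's dict-lookup step by the resolved step
  have hstep : List.foldl (fun M (tp : Int × Int) =>
      match (pvIdxDict P).get? tp.2, (pvIdxDict T).get? tp.1 with
      | some i, some j => M.modify i.toNat (fun row => row.modify j.toNat (· + 1))
      | _, _ => M)
      ((List.range P.length).map (fun _ => List.replicate T.length (0 : Int))) (yt.zip yp)
    = List.foldl (pvStep T P)
      ((List.range P.length).map (fun _ => List.replicate T.length (0 : Int))) (yt.zip yp) := by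
    refine PySem.List.foldl_congr_mem _ _ _ _ ?_
    intro M tp htp
    have ht : tp.1 ∈ T := (hTm tp.1).mpr (List.of_mem_zip htp).1
    have hp : tp.2 ∈ P := (hPm tp.2).mpr (List.of_mem_zip htp).2
    rw [pvIdxDict_get P hPnd tp.2 hp, pvIdxDict_get T hTnd tp.1 ht]
    simp [pvStep]
  simp only [] at hstep ⊢
  rw [hstep, PySem.List.foldl_append_singleton_eq_map, List.nil_append]
  -- both matrices entry by entry
  have hM0len : ((List.range P.length).map (fun _ => List.replicate T.length (0 : Int))).length = P.length := by simp
  have hM0row : ∀ k, k < ((List.range P.length).map (fun _ => List.replicate T.length (0 : Int))).length →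
      (((List.range P.length).map (fun _ => List.replicate T.length (0 : Int))).getD k []).length = T.length := by
    intro k hk
    rw [List.getD_eq_getElem _ _ hk]
    simp
  have hmem : ∀ x ∈ yt.zip yp, x.1 ∈ T ∧ x.2 ∈ P := by
    intro x hx
    exact ⟨(hTm x.1).mpr (List.of_mem_zip hx).1, (hPm x.2).mpr (List.of_mem_zip hx).2⟩
  refine List.ext_getElem ?_ ?_
  · rw [pvFold_len]; simp
  · intro i hi1 hi2
    have hiP : i < P.length := by simpa using hi2
    refine List.ext_getElem ?_ ?_
    · have h1 : ((List.foldl (pvStep T P) _ (yt.zip yp))[i]).length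
          = ((List.foldl (pvStep T P) ((List.range P.length).map (fun _ => List.replicate T.length (0 : Int))) (yt.zip yp)).getD i []).length := by
        rw [List.getD_eq_getElem _ _ hi1]
      rw [h1, pvFold_rowlen, hM0row i (by simpa [hM0len] using hiP)]
      simp
    · intro j hj1 hj2
      have hjT : j < T.length := by
        have := hj2; simpa using this
      -- A's entry
      have hA : (List.foldl (pvStep T P) ((List.range P.length).map (fun _ => List.replicate T.length (0 : Int))) (yt.zip yp))[i][j]
          = pvE (List.foldl (pvStep T P) ((List.range P.length).map (fun _ => List.replicate T.length (0 : Int))) (yt.zip yp)) i j := by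
        rw [pvE, List.getD_eq_getElem _ _ hi1, List.getD_eq_getElem _ _ hj1]
      rw [hA, pvFold_entry T P i j (yt.zip yp) _ hmem (by simpa using hM0len) hM0row]
      have hE0 : pvE ((List.range P.length).map (fun _ => List.replicate T.length (0 : Int))) i j = 0 := by
        rw [pvE, List.getD_eq_getElem _ _ (show i < ((List.range P.length).map (fun _ => List.replicate T.length (0 : Int))).length by rw [hM0len]; exact hiP)]
        simp
      rw [hE0, zero_add, pvCount_eq T P yt yp i j hTnd hPnd hTm hPm hiP hjT]
      -- B's entry: a column count over the filtered row
      simp [PySem.List.count_eq, pvRowCount]
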